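-- pv_equiv track=rewrite | github.com/snedea/legend-of-obsidian-vault | brainbot.py | _generate_fallback_environment
-- ===== SOURCE A (Python) =====
-- def _generate_fallback_environment(title: str, content: str) -> str:
--     """Generate environment description when AI fails"""
--     content_lower = content.lower()
--
--     if any(word in content_lower for word in ['parking', 'lot']):
--         return "Abandoned Phantom Parking Lot"
--     elif any(word in content_lower for word in ['recipe', 'cook']):
--         return "Spectral Kitchen of Lost Recipes"
--     elif any(word in content_lower for word in ['meeting', 'office']):
--         return "Ethereal Conference Chamber"
--     elif any(word in content_lower for word in ['code', 'programming']):
--         return "Digital Realm of Living Code"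
--     elif any(word in content_lower for word in ['network', 'ip']):
--         return "Cyberspace Nexus"
--     elif any(word in content_lower for word in ['shop', 'buy']):
--         return "Merchant's Eternal Bazaar"
--     else:
--         return f"Mystical Sanctuary of {title}"
-- ===== SOURCE B (Python) =====
-- KEYWORD_PRIORITY = {
--     'parking': 0, 'lot': 0,
--     'recipe': 1, 'cook': 1,
--     'meeting': 2, 'office': 2,
--     'code': 3, 'programming': 3,
--     'network': 4, 'ip': 4,
--     'shop': 5, 'buy': 5,
-- }
--
-- LABELS = [
--     "Abandoned Phantom Parking Lot",
--     "Spectral Kitchen of Lost Recipes",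
--     "Ethereal Conference Chamber",
--     "Digital Realm of Living Code",
--     "Cyberspace Nexus",
--     "Merchant's Eternal Bazaar",
-- ]
--
--
-- def _generate_fallback_environment(title: str, content: str) -> str:
--     content_lower = content.lower()
--     best = min(
--         (i for word, i in KEYWORD_PRIORITY.items() if word in content_lower),
--         default=None,
--     )
--     if best is None:
--         return f"Mystical Sanctuary of {title}"
--     return LABELS[best]
-- ===== Notes on version B (the rewrite author's own statement) =====
-- stated objective: alternative
-- what changed: Instead of a priority-ordered first-match cascade, B tests every keyword unconditionally against a flat keyword-to-priority map and returns the label of the minimum matched priority index (no short-circuit, no ordered branch chain).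
import Mathlib
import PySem

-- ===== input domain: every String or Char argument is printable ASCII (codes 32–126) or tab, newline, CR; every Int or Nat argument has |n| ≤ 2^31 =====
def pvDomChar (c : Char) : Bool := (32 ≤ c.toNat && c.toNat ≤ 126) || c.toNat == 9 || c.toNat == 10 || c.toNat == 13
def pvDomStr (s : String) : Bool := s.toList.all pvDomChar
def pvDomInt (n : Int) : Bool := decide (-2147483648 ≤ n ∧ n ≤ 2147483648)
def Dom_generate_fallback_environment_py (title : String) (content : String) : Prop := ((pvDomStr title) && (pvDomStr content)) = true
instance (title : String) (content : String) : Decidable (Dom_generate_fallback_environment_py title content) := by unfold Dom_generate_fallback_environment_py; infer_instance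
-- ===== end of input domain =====

-- B replaces A's priority-ordered first-match cascade by testing all keywords against a flat
-- keyword→priority map and returning the label of the minimum matched index (alternative, same cost).


-- ===== PORT A =====
def generate_fallback_environment_py (title : String) (content : String) : String :=
  let content_lower := PySem.Str.lower content
  if PySem.Str.isIn "parking" content_lower || PySem.Str.isIn "lot" content_lower then
    "Abandoned Phantom Parking Lot"
  else if PySem.Str.isIn "recipe" content_lower || PySem.Str.isIn "cook" content_lower then
    "Spectral Kitchen of Lost Recipes"
  else if PySem.Str.isIn "meeting" content_lower || PySem.Str.isIn "office" content_lower then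
    "Ethereal Conference Chamber"
  else if PySem.Str.isIn "code" content_lower || PySem.Str.isIn "programming" content_lower then
    "Digital Realm of Living Code"
  else if PySem.Str.isIn "network" content_lower || PySem.Str.isIn "ip" content_lower then
    "Cyberspace Nexus"
  else if PySem.Str.isIn "shop" content_lower || PySem.Str.isIn "buy" content_lower then
    "Merchant's Eternal Bazaar"
  else
    "Mystical Sanctuary of " ++ title

-- ===== PORT B =====
def pvKeywordPriority : List (String × Nat) :=
  [ ("parking", 0), ("lot", 0),
    ("recipe", 1), ("cook", 1),
    ("meeting", 2), ("office", 2),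
    ("code", 3), ("programming", 3),
    ("network", 4), ("ip", 4),
    ("shop", 5), ("buy", 5) ]

def pvLabels : List String :=
  [ "Abandoned Phantom Parking Lot",
    "Spectral Kitchen of Lost Recipes",
    "Ethereal Conference Chamber",
    "Digital Realm of Living Code",
    "Cyberspace Nexus",
    "Merchant's Eternal Bazaar" ]

def generate_fallback_environment_py_alt (title : String) (content : String) : String :=
  let content_lower := PySem.Str.lower content
  let matched := pvKeywordPriority.filterMap
    (fun p => if PySem.Str.isIn p.1 content_lower then some p.2 else none)
  match matched.min? with
  | none => "Mystical Sanctuary of " ++ title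
  | some i => pvLabels.getD i ""

-- ===== PRECONDITION & SPEC =====
def Spec_generate_fallback_environment_py (title : String) (content : String) (out : String) : Prop := out = generate_fallback_environment_py_alt title content
instance (title : String) (content : String) (out : String) : Decidable (Spec_generate_fallback_environment_py title content out) := by unfold Spec_generate_fallback_environment_py; infer_instance

-- ===== CLAIM =====
def Claim_equal_generate_fallback_environment_py : Prop := ∀ (title : String) (content : String), Dom_generate_fallback_environment_py title content → Spec_generate_fallback_environment_py title content (generate_fallback_environment_py title content)

-- ===== LEMMAS AND PROOFS =====

-- ===== VERDICT =====
theorem generate_fallback_environment_py_spec : Claim_equal_generate_fallback_environment_py := by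
  intro title content _
  unfold Spec_generate_fallback_environment_py generate_fallback_environment_py generate_fallback_environment_py_alt
  simp only [Bool.or_eq_true]
  split_ifs with h1 h2 h3 h4 h5 h6
  · -- rule 0
    have hm : (pvKeywordPriority.filterMap
        (fun p => if PySem.Str.isIn p.1 (PySem.Str.lower content) = true then some p.2 else none)).min? = some 0 := by
      rw [List.min?_eq_some_iff]
      refine ⟨?_, ?_⟩
      · simp only [pvKeywordPriority, List.mem_filterMap]
        rcases h1 with h | h
        · exact ⟨("parking", 0), by simp, by rw [if_pos h]⟩
        · exact ⟨("lot", 0), by simp, by rw [if_pos h]⟩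
      · intro b hb
        simp only [pvKeywordPriority, List.mem_filterMap] at hb
        obtain ⟨p, hp, hpb⟩ := hb
        fin_cases hp <;> simp_all
    rw [hm]; simp [pvLabels]
  · -- rule 1
    have hm : (pvKeywordPriority.filterMap
        (fun p => if PySem.Str.isIn p.1 (PySem.Str.lower content) = true then some p.2 else none)).min? = some 1 := by
      rw [List.min?_eq_some_iff]
      refine ⟨?_, ?_⟩
      · simp only [pvKeywordPriority, List.mem_filterMap]
        rcases h2 with h | h
        · exact ⟨("recipe", 1), by simp, by rw [if_pos h]⟩
        · exact ⟨("cook", 1), by simp, by rw [if_pos h]⟩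
      · intro b hb
        simp only [pvKeywordPriority, List.mem_filterMap] at hb
        obtain ⟨p, hp, hpb⟩ := hb
        fin_cases hp <;> simp_all <;> omega
    rw [hm]; simp [pvLabels]
  · -- rule 2
    have hm : (pvKeywordPriority.filterMap
        (fun p => if PySem.Str.isIn p.1 (PySem.Str.lower content) = true then some p.2 else none)).min? = some 2 := by
      rw [List.min?_eq_some_iff]
      refine ⟨?_, ?_⟩
      · simp only [pvKeywordPriority, List.mem_filterMap]
        rcases h3 with h | h
        · exact ⟨("meeting", 2), by simp, by rw [if_pos h]⟩
        · exact ⟨("office", 2), by simp, by rw [if_pos h]⟩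
      · intro b hb
        simp only [pvKeywordPriority, List.mem_filterMap] at hb
        obtain ⟨p, hp, hpb⟩ := hb
        fin_cases hp <;> simp_all <;> omega
    rw [hm]; simp [pvLabels]
  · -- rule 3
    have hm : (pvKeywordPriority.filterMap
        (fun p => if PySem.Str.isIn p.1 (PySem.Str.lower content) = true then some p.2 else none)).min? = some 3 := by
      rw [List.min?_eq_some_iff]
      refine ⟨?_, ?_⟩
      · simp only [pvKeywordPriority, List.mem_filterMap]
        rcases h4 with h | h
        · exact ⟨("code", 3), by simp, by rw [if_pos h]⟩
        · exact ⟨("programming", 3), by simp, by rw [if_pos h]⟩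
      · intro b hb
        simp only [pvKeywordPriority, List.mem_filterMap] at hb
        obtain ⟨p, hp, hpb⟩ := hb
        fin_cases hp <;> simp_all <;> omega
    rw [hm]; simp [pvLabels]
  · -- rule 4
    have hm : (pvKeywordPriority.filterMap
        (fun p => if PySem.Str.isIn p.1 (PySem.Str.lower content) = true then some p.2 else none)).min? = some 4 := by
      rw [List.min?_eq_some_iff]
      refine ⟨?_, ?_⟩
      · simp only [pvKeywordPriority, List.mem_filterMap]
        rcases h5 with h | h
        · exact ⟨("network", 4), by simp, by rw [if_pos h]⟩
        · exact ⟨("ip", 4), by simp, by rw [if_pos h]⟩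
      · intro b hb
        simp only [pvKeywordPriority, List.mem_filterMap] at hb
        obtain ⟨p, hp, hpb⟩ := hb
        fin_cases hp <;> simp_all <;> omega
    rw [hm]; simp [pvLabels]
  · -- rule 5
    have hm : (pvKeywordPriority.filterMap
        (fun p => if PySem.Str.isIn p.1 (PySem.Str.lower content) = true then some p.2 else none)).min? = some 5 := by
      rw [List.min?_eq_some_iff]
      refine ⟨?_, ?_⟩
      · simp only [pvKeywordPriority, List.mem_filterMap]
        rcases h6 with h | h
        · exact ⟨("shop", 5), by simp, by rw [if_pos h]⟩
        · exact ⟨("buy", 5), by simp, by rw [if_pos h]⟩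
      · intro b hb
        simp only [pvKeywordPriority, List.mem_filterMap] at hb
        obtain ⟨p, hp, hpb⟩ := hb
        fin_cases hp <;> simp_all
    rw [hm]; simp [pvLabels]
  · -- no rule matched
    have hm : (pvKeywordPriority.filterMap
        (fun p => if PySem.Str.isIn p.1 (PySem.Str.lower content) = true then some p.2 else none)) = [] := by
      simp only [pvKeywordPriority, List.filterMap_eq_nil_iff]
      intro p hp
      fin_cases hp <;> simp_all
    rw [hm]; rfl
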